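-- pv_equiv track=rewrite | github.com/khuushichand/aiml-project | tldw_Server_API/app/services/admin_system_ops_service.py | _normalize_allowlist_emails
-- ===== SOURCE A (Python) =====
-- def _normalize_allowlist_emails(values: list[str] | None) -> list[str]:
--     if not values:
--         return []
--     cleaned = []
--     for val in values:
--         if not val:
--             continue
--         cleaned.append(str(val).strip().lower())
--     return sorted({val for val in cleaned if val})
-- ===== SOURCE B (Python) =====
-- from itertools import groupby
--
-- def _normalize_allowlist_emails(values: list[str] | None) -> list[str]:
--     cleaned = sorted(str(v).strip().lower() for v in (values or []) if v)
--     return [k for k, _ in groupby(cleaned) if k]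
-- ===== Notes on version B (the rewrite author's own statement) =====
-- stated objective: alternative
-- what changed: Replaces hash-set deduplication followed by sorting with sorting the normalized list first and removing duplicates (and the empty string) in a single adjacent-run pass via itertools.groupby.
import Mathlib
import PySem

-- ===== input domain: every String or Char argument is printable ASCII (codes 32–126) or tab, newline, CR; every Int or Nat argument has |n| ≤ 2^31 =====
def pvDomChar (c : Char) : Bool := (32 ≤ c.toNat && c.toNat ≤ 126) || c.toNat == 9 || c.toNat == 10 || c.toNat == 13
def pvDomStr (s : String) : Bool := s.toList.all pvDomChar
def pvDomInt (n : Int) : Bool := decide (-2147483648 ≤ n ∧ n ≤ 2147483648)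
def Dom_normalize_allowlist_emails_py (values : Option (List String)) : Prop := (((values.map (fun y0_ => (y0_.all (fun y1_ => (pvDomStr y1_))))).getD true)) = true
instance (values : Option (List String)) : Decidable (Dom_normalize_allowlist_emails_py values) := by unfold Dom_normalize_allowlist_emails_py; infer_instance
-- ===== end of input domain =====

-- B replaces set-then-sort with sort-then-adjacent-dedup (groupby); same exact output.

-- ===== PORT A =====
-- sorted({val for val in cleaned if val}) after building cleaned with a loop
def normalize_allowlist_emails_py (values : Option (List String)) : List String :=
  match values with
  | none => []
  | some vs =>
    if vs = [] then []
    else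
      let cleaned := vs.foldl (fun acc val =>
        if val = "" then acc
        else acc ++ [PySem.Str.lower (PySem.Str.strip val)]) []
      PySem.List.sorted (PySem.Set.ofList (cleaned.filter (fun v => v ≠ ""))) (fun x => x) false

-- ===== PORT B =====
-- itertools.groupby over the sorted run: first element of each run of equal values
def pvGroupbyFirsts : List String → List String
  | [] => []
  | [x] => [x]
  | x :: y :: t => if x = y then pvGroupbyFirsts (y :: t) else x :: pvGroupbyFirsts (y :: t)

def normalize_allowlist_emails_py_alt (values : Option (List String)) : List String :=
  let cleaned := PySem.List.sorted
    (((values.getD []).filter (fun v => v ≠ "")).map (fun v => PySem.Str.lower (PySem.Str.strip v)))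
    (fun x => x) false
  (pvGroupbyFirsts cleaned).filter (fun k => k ≠ "")

-- ===== PRECONDITION & SPEC =====
def Spec_normalize_allowlist_emails_py (values : Option (List String)) (out : List String) : Prop := out = normalize_allowlist_emails_py_alt values
instance (values : Option (List String)) (out : List String) : Decidable (Spec_normalize_allowlist_emails_py values out) := by unfold Spec_normalize_allowlist_emails_py; infer_instance

-- ===== CLAIM (what is proved, stated in full; the proofs are below) =====
def Claim_equal_normalize_allowlist_emails_py : Prop := ∀ (values : Option (List String)), Dom_normalize_allowlist_emails_py values → Spec_normalize_allowlist_emails_py values (normalize_allowlist_emails_py values)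

-- ===== LEMMAS AND PROOFS =====

theorem mem_pvGroupbyFirsts (x : String) (l : List String) :
    x ∈ pvGroupbyFirsts l ↔ x ∈ l := by
  induction l with
  | nil => simp [pvGroupbyFirsts]
  | cons a t ih =>
    cases t with
    | nil => simp [pvGroupbyFirsts]
    | cons b t' =>
      simp only [pvGroupbyFirsts]
      split_ifs with h
      · subst h; rw [ih]; simp
      · rw [List.mem_cons, ih]; simp

theorem pairwise_lt_pvGroupbyFirsts (l : List String)
    (h : l.Pairwise (· ≤ ·)) : (pvGroupbyFirsts l).Pairwise (· < ·) := by
  induction l with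
  | nil => simp [pvGroupbyFirsts]
  | cons a t ih =>
    cases t with
    | nil => simp [pvGroupbyFirsts]
    | cons b t' =>
      rcases List.pairwise_cons.mp h with ⟨ha, ht⟩
      simp only [pvGroupbyFirsts]
      split_ifs with hab
      · exact ih ht
      · refine List.pairwise_cons.mpr ⟨?_, ih ht⟩
        intro z hz
        have hzm : z ∈ b :: t' := (mem_pvGroupbyFirsts z _).mp hz
        have hbz : b ≤ z := by
          rcases List.mem_cons.mp hzm with rfl | hz'
          · exact le_refl z
          · exact (List.pairwise_cons.mp ht).1 z hz'
        have hab' : a < b := lt_of_le_of_ne (ha b (by simp)) hab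
        exact lt_of_lt_of_le hab' hbz

theorem normalize_allowlist_emails_py_spec : Claim_equal_normalize_allowlist_emails_py := by
  intro values _
  unfold Spec_normalize_allowlist_emails_py normalize_allowlist_emails_py normalize_allowlist_emails_py_alt
  cases values with
  | none => simp [pvGroupbyFirsts, PySem.List.sorted]
  | some vs =>
    simp only [Option.getD_some]
    by_cases hvs : vs = []
    · subst hvs; simp [pvGroupbyFirsts, PySem.List.sorted]
    · simp only [if_neg hvs]
      have hflip : (fun (acc : List String) val => if val = "" then acc else acc ++ [PySem.Str.lower (PySem.Str.strip val)])
          = (fun acc val => if decide (val ≠ "") = true then acc ++ [PySem.Str.lower (PySem.Str.strip val)] else acc) := by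
        funext acc val; by_cases h : val = "" <;> simp [h]
      rw [hflip, PySem.List.foldl_append_if]
      simp only [List.nil_append]
      set cleaned := (vs.filter (fun v => v ≠ "")).map (fun v => PySem.Str.lower (PySem.Str.strip v)) with hc
      set srt := PySem.List.sorted cleaned (fun x => x) false with hs
      have hpw : srt.Pairwise (· ≤ ·) := by
        simpa using PySem.List.sorted_pairwise (xs := cleaned) (key := fun x => x)
      have hlt : ((pvGroupbyFirsts srt).filter (fun k => k ≠ "")).Pairwise (· < ·) :=
        List.Pairwise.filter _ (pairwise_lt_pvGroupbyFirsts srt hpw)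
      have hnd₁ : ((pvGroupbyFirsts srt).filter (fun k => k ≠ "")).Nodup :=
        hlt.imp (fun h => ne_of_lt h)
      have hnd₂ : (PySem.Set.ofList (cleaned.filter (fun v => v ≠ ""))).Nodup :=
        PySem.Set.nodup_ofList _
    -- same members
      have hperm : ((pvGroupbyFirsts srt).filter (fun k => k ≠ "")).Perm
          (PySem.Set.ofList (cleaned.filter (fun v => v ≠ ""))) := by
        rw [List.perm_ext_iff_of_nodup hnd₁ hnd₂]
        intro x
        simp only [List.mem_filter, mem_pvGroupbyFirsts, PySem.Set.mem_ofList]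
        have hmem : x ∈ srt ↔ x ∈ cleaned := by
          rw [hs]; exact PySem.List.mem_sorted cleaned (fun x => x) false x
        rw [hmem]
      exact PySem.List.sorted_eq_of_perm_of_pairwise_lt _ _ (fun x => x) hperm hlt

-- ===== VERDICT (by name: the statement is the Claim_ definition above) =====
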